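-- pv_equiv track=rewrite | github.com/reading-stiener/For-the-love-of-algos | sum_mutated_target.py | findBestValue
-- ===== SOURCE A (Python) =====
-- def findBestValue(arr, target):
--     def sum_mutated(arr, val):
--         total = 0
--         for num in arr:
--             if num > val:
--                 total += val
--             else:
--                 total += num
--         return abs(total - target)
--     min_val = 0
--     max_val = max(arr)
--     mid_val = (min_val + max_val) // 2
--     while min_val < max_val:
--         if sum_mutated(arr, mid_val) > sum_mutated(arr, mid_val+1):
--             min_val = mid_val + 1
--         elif sum_mutated(arr, mid_val) <= sum_mutated(arr, mid_val+1):
--             max_val = mid_val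
--         mid_val = (min_val + max_val) // 2
--     return min_val
-- ===== SOURCE B (Python) =====
-- def findBestValue(arr, target):
--     # Sort once and use prefix sums + an inner binary search, so each
--     # evaluation of the mutated sum is O(log n) instead of O(n).
--     s = sorted(arr)
--     n = len(s)
--     pre = [0]
--     for x in s:
--         pre.append(pre[-1] + x)
--
--     def sm(val):
--         # number of elements <= val (bisect_right, hand-written: no imports)
--         lo, hi = 0, n
--         while lo < hi:
--             mid = (lo + hi) // 2
--             if s[mid] <= val:
--                 lo = mid + 1
--             else:
--                 hi = mid
--         return abs(pre[lo] + val * (n - lo) - target)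
--
--     lo, hi = 0, s[-1]
--     while lo < hi:
--         mid = (lo + hi) // 2
--         if sm(mid) > sm(mid + 1):
--             lo = mid + 1
--         else:
--             hi = mid
--     return lo
-- ===== Notes on version B (the rewrite author's own statement) =====
-- stated objective: faster
-- what changed: B sorts the array once and builds prefix sums, so each probe of the outer binary search evaluates the mutated sum in O(log n) via an inner binary search instead of A's O(n) scan of the whole array.
-- outside the precondition, e.g. on findBestValue([], 0): A raises ValueError, B raises IndexError
import Mathlib
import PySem

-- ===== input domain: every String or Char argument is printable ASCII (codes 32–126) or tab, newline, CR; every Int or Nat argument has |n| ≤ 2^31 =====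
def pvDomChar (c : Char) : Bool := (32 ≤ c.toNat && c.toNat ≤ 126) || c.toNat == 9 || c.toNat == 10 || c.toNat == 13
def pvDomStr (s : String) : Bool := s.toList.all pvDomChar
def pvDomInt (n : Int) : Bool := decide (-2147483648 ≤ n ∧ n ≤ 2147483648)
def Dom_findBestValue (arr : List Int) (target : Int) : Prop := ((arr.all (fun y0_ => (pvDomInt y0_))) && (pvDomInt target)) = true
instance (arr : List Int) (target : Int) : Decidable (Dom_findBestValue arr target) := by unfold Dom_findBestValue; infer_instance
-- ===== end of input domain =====

-- B sorts once and evaluates the mutated sum via prefix sums and an inner binary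
-- search (O(log n) per probe) instead of A's O(n) scan per probe; return value only.

-- ===== PORT A =====
-- sum_mutated(arr, val) (target captured from the enclosing scope)
def sumMutated (arr : List Int) (target val : Int) : Int :=
  |arr.foldl (fun total num => if num > val then total + val else total + num) 0 - target|

-- A's while-loop over [min_val, max_val]; the elif condition is the exact negation
-- of the if condition, so it is transliterated as the else branch.
def loopA (arr : List Int) (target : Int) (minV maxV : Int) : Int :=
  if h : minV < maxV then
    let mid := PySem.Int.floordiv (minV + maxV) 2
    if sumMutated arr target mid > sumMutated arr target (mid + 1) then
      loopA arr target (mid + 1) maxV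
    else
      loopA arr target minV mid
  else minV
termination_by (maxV - minV).toNat
decreasing_by
  · have := PySem.Int.floordiv_two_mid_bounds (le_of_lt h)
    omega
  · have := PySem.Int.floordiv_two_mid_bounds (le_of_lt h)
    have : PySem.Int.floordiv (minV + maxV) 2 < maxV := by
      rw [PySem.Int.floordiv_lt_iff_lt_mul (by omega)]; omega
    omega

-- max(arr) raises ValueError on []; Pre_ excludes [], so the .getD 0 is never reached inside Pre_
def findBestValue (arr : List Int) (target : Int) : Int :=
  let maxV := (PySem.List.max? arr (fun x => x)).getD 0
  loopA arr target 0 maxV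

-- ===== PORT B =====
-- hand-written bisect_right: number of elements of s that are <= val
def bisectCount (s : List Int) (val : Int) (lo hi : Int) : Int :=
  if h : lo < hi then
    let mid := PySem.Int.floordiv (lo + hi) 2
    if PySem.List.pyGetD s mid 0 ≤ val then bisectCount s val (mid + 1) hi
    else bisectCount s val lo mid
  else lo
termination_by (hi - lo).toNat
decreasing_by
  · have := PySem.Int.floordiv_two_mid_bounds (le_of_lt h)
    omega
  · have := PySem.Int.floordiv_two_mid_bounds (le_of_lt h)
    have : PySem.Int.floordiv (lo + hi) 2 < hi := by
      rw [PySem.Int.floordiv_lt_iff_lt_mul (by omega)]; omega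
    omega

-- pre = [0]; for x in s: pre.append(pre[-1] + x)
def buildPre (s : List Int) : List Int :=
  s.foldl (fun pre x => pre ++ [PySem.List.pyGetD pre (-1) 0 + x]) [0]

-- B's sm(val): prefix sum at the bisect point plus val for every larger element
def smFast (s pre : List Int) (n target val : Int) : Int :=
  let k := bisectCount s val 0 n
  |PySem.List.pyGetD pre k 0 + val * (n - k) - target|

def loopB (s pre : List Int) (n target : Int) (lo hi : Int) : Int :=
  if h : lo < hi then
    let mid := PySem.Int.floordiv (lo + hi) 2
    if smFast s pre n target mid > smFast s pre n target (mid + 1) then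
      loopB s pre n target (mid + 1) hi
    else
      loopB s pre n target lo mid
  else lo
termination_by (hi - lo).toNat
decreasing_by
  · have := PySem.Int.floordiv_two_mid_bounds (le_of_lt h)
    omega
  · have := PySem.Int.floordiv_two_mid_bounds (le_of_lt h)
    have : PySem.Int.floordiv (lo + hi) 2 < hi := by
      rw [PySem.Int.floordiv_lt_iff_lt_mul (by omega)]; omega
    omega

-- s[-1] raises IndexError on []; excluded by Pre_
def findBestValue_alt (arr : List Int) (target : Int) : Int :=
  let s := PySem.List.sorted arr (fun x => x) false
  let n : Int := (s.length : Int)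
  let pre := buildPre s
  loopB s pre n target 0 (PySem.List.pyGetD s (-1) 0)

-- ===== PRECONDITION & SPEC =====
-- On [], A raises ValueError (max of empty) and B raises IndexError (s[-1]); excluded.
def Pre_findBestValue (arr : List Int) (target : Int) : Prop := arr ≠ []
instance (arr : List Int) (target : Int) : Decidable (Pre_findBestValue arr target) := by
  unfold Pre_findBestValue; infer_instance

def pvWitness_findBestValue : List Int × Int := ([2, 7, 1], 6)

def Spec_findBestValue (arr : List Int) (target : Int) (out : Int) : Prop := out = findBestValue_alt arr target
instance (arr : List Int) (target : Int) (out : Int) : Decidable (Spec_findBestValue arr target out) := by unfold Spec_findBestValue; infer_instance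

-- ===== CLAIM (what is proved, stated in full; the proofs are below) =====
def Claim_equal_findBestValue : Prop := ∀ (arr : List Int) (target : Int), Dom_findBestValue arr target → Pre_findBestValue arr target → Spec_findBestValue arr target (findBestValue arr target)

-- ===== LEMMAS AND PROOFS =====

-- foldl accumulation = sum of mapped list
theorem foldl_min_sum (arr : List Int) (val : Int) (c : Int) :
    arr.foldl (fun total num => if num > val then total + val else total + num) c
      = c + (arr.map (fun x => min x val)).sum := by
  induction arr generalizing c with
  | nil => simp
  | cons x xs ih =>
    simp only [List.foldl_cons, List.map_cons, List.sum_cons, ih]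
    by_cases hx : x > val
    · rw [if_pos hx, min_eq_right (le_of_lt hx)]; ring
    · rw [if_neg hx, min_eq_left (not_lt.mp hx)]; ring

theorem sumMutated_eq (arr : List Int) (target val : Int) :
    sumMutated arr target val = |(arr.map (fun x => min x val)).sum - target| := by
  unfold sumMutated
  rw [foldl_min_sum]
  simp

-- monotone access in a sorted list
theorem sorted_getD_mono (s : List Int) (hs : s.Pairwise (· ≤ ·))
    (i j : Nat) (hij : i ≤ j) (hj : j < s.length) :
    s.getD i 0 ≤ s.getD j 0 := by
  rcases eq_or_lt_of_le hij with rfl | hlt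
  · exact le_refl _
  · rw [List.getD_eq_getElem s 0 (lt_of_le_of_lt hij hj), List.getD_eq_getElem s 0 hj]
    exact (List.pairwise_iff_getElem.mp hs) i j (lt_of_le_of_lt hij hj) hj hlt

-- bisect invariant
theorem bisectCount_spec (s : List Int) (val : Int) (hs : s.Pairwise (· ≤ ·)) :
    ∀ lo hi : Int, 0 ≤ lo → lo ≤ hi → hi ≤ (s.length : Int) →
    (∀ j : Nat, (j : Int) < lo → s.getD j 0 ≤ val) →
    (∀ j : Nat, hi ≤ (j : Int) → j < s.length → val < s.getD j 0) →
    0 ≤ bisectCount s val lo hi ∧ bisectCount s val lo hi ≤ (s.length : Int) ∧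
    (∀ j : Nat, (j : Int) < bisectCount s val lo hi → s.getD j 0 ≤ val) ∧
    (∀ j : Nat, bisectCount s val lo hi ≤ (j : Int) → j < s.length → val < s.getD j 0) := by
  have H : ∀ μ : Nat, ∀ lo hi : Int, (hi - lo).toNat = μ →
      0 ≤ lo → lo ≤ hi → hi ≤ (s.length : Int) →
      (∀ j : Nat, (j : Int) < lo → s.getD j 0 ≤ val) →
      (∀ j : Nat, hi ≤ (j : Int) → j < s.length → val < s.getD j 0) →
      0 ≤ bisectCount s val lo hi ∧ bisectCount s val lo hi ≤ (s.length : Int) ∧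
      (∀ j : Nat, (j : Int) < bisectCount s val lo hi → s.getD j 0 ≤ val) ∧
      (∀ j : Nat, bisectCount s val lo hi ≤ (j : Int) → j < s.length → val < s.getD j 0) := by
    intro μ
    induction μ using Nat.strong_induction_on with
    | _ μ ih =>
      intro lo hi hμ h0 hlh hhn hlow hhigh
      rw [bisectCount]
      by_cases h : lo < hi
      · simp only [dif_pos h]
        have hb := PySem.Int.floordiv_two_mid_bounds (le_of_lt h)
        have hlt : PySem.Int.floordiv (lo + hi) 2 < hi := by
          rw [PySem.Int.floordiv_lt_iff_lt_mul (by omega)]; omega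
        set mid := PySem.Int.floordiv (lo + hi) 2 with hmid
        have hmrange : 0 ≤ mid ∧ mid < (s.length : Int) := by omega
        have hmn : mid.toNat < s.length := by omega
        have hgetmid : PySem.List.pyGetD s mid 0 = s.getD mid.toNat 0 := by
          rw [PySem.List.pyGetD_eq_getElem s 0 (by omega) (by omega),
            List.getD_eq_getElem s 0 hmn]
        by_cases hc : PySem.List.pyGetD s mid 0 ≤ val
        · rw [if_pos hc]
          refine ih (hi - (mid + 1)).toNat (by omega) (mid + 1) hi rfl (by omega) (by omega) hhn ?_ hhigh
          intro j hj
          have hjm : j ≤ mid.toNat := by omega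
          calc s.getD j 0 ≤ s.getD mid.toNat 0 := sorted_getD_mono s hs j mid.toNat hjm hmn
            _ ≤ val := by rw [← hgetmid]; exact hc
        · rw [if_neg hc]
          refine ih (mid - lo).toNat (by omega) lo mid rfl h0 (by omega) (by omega) hlow ?_
          intro j hj hjn
          have hjm : mid.toNat ≤ j := by omega
          calc val < s.getD mid.toNat 0 := by rw [← hgetmid]; omega
            _ ≤ s.getD j 0 := sorted_getD_mono s hs mid.toNat j hjm hjn
      · simp only [dif_neg h]
        refine ⟨h0, by omega, hlow, ?_⟩
        intro j hj hjn
        exact hhigh j (by omega) hjn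
  intro lo hi h0 hlh hhn hlow hhigh
  exact H (hi - lo).toNat lo hi rfl h0 hlh hhn hlow hhigh

theorem buildPre_eq (s : List Int) :
    buildPre s = (List.range (s.length + 1)).map (fun j => (s.take j).sum) := by
  induction s using List.reverseRecOn with
  | nil => simp [buildPre]
  | append_singleton s x ih =>
    unfold buildPre at ih ⊢
    rw [List.foldl_append, ih, List.foldl_cons, List.foldl_nil]
    have hlast : PySem.List.pyGetD ((List.range (s.length + 1)).map (fun j => (s.take j).sum)) (-1) 0
        = s.sum := by
      rw [List.range_succ, List.map_append, List.map_singleton,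
        PySem.List.pyGetD_neg_one_append_singleton, List.take_of_length_le (le_refl _)]
    have hlen : (s ++ [x]).length = s.length + 1 := by simp
    rw [hlast, hlen]
    conv_rhs => rw [List.range_succ, List.map_append, List.map_singleton]
    congr 1
    · apply List.map_congr_left
      intro j hj
      rw [List.mem_range] at hj
      rw [List.take_append_of_le_length (by omega)]
    · rw [List.take_of_length_le (by simp), List.sum_append, List.sum_singleton]

theorem buildPre_getD (s : List Int) (k : Int) (h0 : 0 ≤ k) (hk : k ≤ (s.length : Int)) :
    PySem.List.pyGetD (buildPre s) k 0 = (s.take k.toNat).sum := by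
  rw [buildPre_eq]
  rw [PySem.List.pyGetD_eq_getElem _ 0 h0 (by simp; omega)]
  rw [List.getElem_map, List.getElem_range]

-- split sum at the bisect point
theorem split_sum (s : List Int) (val : Int) (k : Int)
    (h0 : 0 ≤ k) (hk : k ≤ (s.length : Int))
    (hle : ∀ j : Nat, (j : Int) < k → s.getD j 0 ≤ val)
    (hgt : ∀ j : Nat, k ≤ (j : Int) → j < s.length → val < s.getD j 0) :
    (s.map (fun x => min x val)).sum = (s.take k.toNat).sum + val * ((s.length : Int) - k) := by
  conv_lhs => rw [← List.take_append_drop k.toNat s]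
  rw [List.map_append, List.sum_append]
  have h1 : (s.take k.toNat).map (fun x => min x val) = s.take k.toNat := by
    rw [show s.take k.toNat = (s.take k.toNat).map id by simp]
    rw [List.map_map]
    apply List.map_congr_left
    intro x hx
    obtain ⟨i, hi, rfl⟩ := List.mem_iff_getElem.mp hx
    simp only [List.length_take, lt_min_iff] at hi
    rw [List.getElem_take]
    have := hle i (by omega)
    rw [List.getD_eq_getElem s 0 (by omega)] at this
    simp [min_eq_left this]
  have h2 : (s.drop k.toNat).map (fun x => min x val) = List.replicate (s.length - k.toNat) val := by
    rw [List.eq_replicate_iff]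
    constructor
    · simp
    · intro b hb
      rw [List.mem_map] at hb
      obtain ⟨x, hx, rfl⟩ := hb
      obtain ⟨i, hi, rfl⟩ := List.mem_iff_getElem.mp hx
      rw [List.getElem_drop]
      have hilen : k.toNat + i < s.length := by simp [List.length_drop] at hi; omega
      have := hgt (k.toNat + i) (by omega) hilen
      rw [List.getD_eq_getElem s 0 hilen] at this
      exact min_eq_right (le_of_lt this)
  rw [h1, h2, List.sum_replicate, nsmul_eq_mul]
  have hcast : ((s.length - k.toNat : Nat) : Int) = (s.length : Int) - k := by omega
  push_cast [hcast]
  ring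

theorem smFast_eq (arr : List Int) (target : Int) :
    ∀ val, smFast (PySem.List.sorted arr (fun x => x) false)
        (buildPre (PySem.List.sorted arr (fun x => x) false))
        (((PySem.List.sorted arr (fun x => x) false).length : Int)) target val
      = sumMutated arr target val := by
  intro val
  have hpair : (PySem.List.sorted arr (fun x => x) false).Pairwise (· ≤ ·) := by
    simpa using PySem.List.sorted_pairwise arr (fun x => x)
  obtain ⟨hk0, hkn, hle, hgt⟩ :=
    bisectCount_spec (PySem.List.sorted arr (fun x => x) false) val hpair
      0 ((PySem.List.sorted arr (fun x => x) false).length : Int)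
      (le_refl 0) (Int.natCast_nonneg _) (le_refl _)
      (fun j hj => absurd hj (by omega))
      (fun j hj hjn => absurd hjn (by omega))
  unfold smFast
  dsimp only
  rw [buildPre_getD _ _ hk0 hkn]
  rw [← split_sum _ val _ hk0 hkn hle hgt]
  rw [sumMutated_eq]
  have hperm := (PySem.List.sorted_perm arr (fun x => x) false).map (fun x => min x val)
  rw [hperm.sum_eq]

theorem loop_congr (arr : List Int) (target : Int) (s pre : List Int) (n : Int)
    (hsm : ∀ val, smFast s pre n target val = sumMutated arr target val) :
    ∀ lo hi : Int, loopB s pre n target lo hi = loopA arr target lo hi := by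
  have H : ∀ μ : Nat, ∀ lo hi : Int, (hi - lo).toNat = μ →
      loopB s pre n target lo hi = loopA arr target lo hi := by
    intro μ
    induction μ using Nat.strong_induction_on with
    | _ μ ih =>
      intro lo hi hμ
      rw [loopB, loopA]
      by_cases h : lo < hi
      · simp only [dif_pos h, hsm]
        have hb := PySem.Int.floordiv_two_mid_bounds (le_of_lt h)
        have hlt : PySem.Int.floordiv (lo + hi) 2 < hi := by
          rw [PySem.Int.floordiv_lt_iff_lt_mul (by omega)]; omega
        by_cases hc : sumMutated arr target (PySem.Int.floordiv (lo + hi) 2)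
            > sumMutated arr target (PySem.Int.floordiv (lo + hi) 2 + 1)
        · rw [if_pos hc, if_pos hc]
          exact ih _ (by omega) _ _ rfl
        · rw [if_neg hc, if_neg hc]
          exact ih _ (by omega) _ _ rfl
      · simp only [dif_neg h]
  intro lo hi
  exact H (hi - lo).toNat lo hi rfl

def maxStep (acc : Option Int) (x : Int) : Option Int :=
  match acc with
  | none => some x
  | some m => if m < x then some x else some m

theorem max?_eq_foldl (xs : List Int) :
    PySem.List.max? xs (fun x => x) = xs.foldl maxStep none := by
  unfold PySem.List.max?
  congr 1
  funext acc x
  cases acc <;> rfl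

theorem max?_mem_aux (xs : List Int) (acc : Option Int) (m : Int)
    (h : xs.foldl maxStep acc = some m) : m ∈ xs ∨ acc = some m := by
  induction xs generalizing acc with
  | nil => exact Or.inr h
  | cons x xs ih =>
    simp only [List.foldl_cons] at h
    rcases ih _ h with hm | hm
    · exact Or.inl (List.mem_cons_of_mem _ hm)
    · cases acc with
      | none => simp [maxStep] at hm; exact Or.inl (hm ▸ List.mem_cons_self)
      | some a =>
        by_cases hc : a < x
        · simp [maxStep, hc] at hm; exact Or.inl (hm ▸ List.mem_cons_self)
        · simp [maxStep, hc] at hm; exact Or.inr (by rw [hm])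

theorem max?_mem {xs : List Int} {m : Int}
    (h : PySem.List.max? xs (fun x => x) = some m) : m ∈ xs := by
  rw [max?_eq_foldl] at h
  rcases max?_mem_aux xs none m h with hm | hm
  · exact hm
  · simp at hm

theorem max?_isSome_aux (xs : List Int) (a : Int) :
    (xs.foldl maxStep (some a)).isSome := by
  induction xs generalizing a with
  | nil => rfl
  | cons x xs ih =>
    simp only [List.foldl_cons]
    by_cases hc : a < x
    · simpa [maxStep, hc] using ih x
    · simpa [maxStep, hc] using ih a

theorem max?_isSome {xs : List Int} (h : xs ≠ []) :
    (PySem.List.max? xs (fun x => x)).isSome := by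
  cases xs with
  | nil => exact absurd rfl h
  | cons x xs =>
    rw [max?_eq_foldl]
    simpa [maxStep] using max?_isSome_aux xs x

theorem last_sorted_eq_max (arr : List Int) (h : arr ≠ []) :
    PySem.List.pyGetD (PySem.List.sorted arr (fun x => x) false) (-1) 0
      = (PySem.List.max? arr (fun x => x)).getD 0 := by
  have hlen : (PySem.List.sorted arr (fun x => x) false).length = arr.length :=
    PySem.List.length_sorted arr (fun x => x) false
  have hsne : PySem.List.sorted arr (fun x => x) false ≠ [] := by
    intro hc
    exact h (List.length_eq_zero_iff.mp (by rw [← hlen, hc, List.length_nil]))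
  rw [PySem.List.pyGetD_neg_one _ _ hsne]
  obtain ⟨m, hm⟩ := Option.isSome_iff_exists.mp (max?_isSome h)
  rw [hm, Option.getD_some]
  have hpair : (PySem.List.sorted arr (fun x => x) false).Pairwise (· ≤ ·) := by
    simpa using PySem.List.sorted_pairwise arr (fun x => x)
  apply le_antisymm
  · exact PySem.List.max?_isMax hm _
      ((PySem.List.mem_sorted arr (fun x => x) false _).mp (List.getLast_mem hsne))
  · have hmem : m ∈ PySem.List.sorted arr (fun x => x) false :=
      (PySem.List.mem_sorted arr (fun x => x) false m).mpr (max?_mem hm)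
    obtain ⟨i, hi, rfl⟩ := List.mem_iff_getElem.mp hmem
    have hmono := sorted_getD_mono _ hpair i ((PySem.List.sorted arr (fun x => x) false).length - 1)
      (by omega) (by omega)
    rw [List.getD_eq_getElem _ 0 hi, List.getD_eq_getElem _ 0 (by omega)] at hmono
    rw [List.getLast_eq_getElem]
    exact hmono

-- ===== VERDICT (by name: the statement is the Claim_ definition above) =====
theorem findBestValue_spec : Claim_equal_findBestValue := by
  intro arr target _ hpre
  unfold Spec_findBestValue findBestValue findBestValue_alt
  dsimp only
  rw [last_sorted_eq_max arr hpre]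
  exact (loop_congr arr target _ _ _ (smFast_eq arr target) 0 _).symm
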